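-- pv_equiv track=rewrite | github.com/empezarcero/pov | src/pov/input.py | _escape_sendkeys_text
-- ===== SOURCE A (Python) =====
-- def _escape_sendkeys_text(text: str) -> str:
--     """Escape special SendKeys characters in literal text.
--
--     SendKeys treats ``+``, ``^``, ``%``, ``~``, ``(``, ``)``, ``{``, ``}``
--     as special.  We wrap them in braces to send them literally.
--     """
--     result = []
--     for ch in text:
--         if ch in ("+", "^", "%", "~", "(", ")", "{", "}"):
--             result.append("{" + ch + "}")
--         else:
--             result.append(ch)
--     return "".join(result)
-- ===== SOURCE B (Python) =====
-- _SPECIALS = set("+^%~(){}")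
--
-- def _escape_sendkeys_text(text: str) -> str:
--     """Escape special SendKeys characters in literal text.
--
--     Two-pointer segment scanner: copies maximal runs of ordinary characters
--     as whole slices, wrapping each special character in braces as it is hit.
--     """
--     out = []
--     i = 0
--     n = len(text)
--     while i < n:
--         j = i
--         while j < n and text[j] not in _SPECIALS:
--             j += 1
--         out.append(text[i:j])
--         if j < n:
--             out.append("{" + text[j] + "}")
--             j += 1
--         i = j
--     return "".join(out)
-- ===== Notes on version B (the rewrite author's own statement) =====
-- stated objective: alternative
-- what changed: Replaced the per-character loop with membership branch by a two-pointer segment scanner that copies maximal runs of ordinary characters as whole slices and brace-wraps each special character it hits.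
import Mathlib
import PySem

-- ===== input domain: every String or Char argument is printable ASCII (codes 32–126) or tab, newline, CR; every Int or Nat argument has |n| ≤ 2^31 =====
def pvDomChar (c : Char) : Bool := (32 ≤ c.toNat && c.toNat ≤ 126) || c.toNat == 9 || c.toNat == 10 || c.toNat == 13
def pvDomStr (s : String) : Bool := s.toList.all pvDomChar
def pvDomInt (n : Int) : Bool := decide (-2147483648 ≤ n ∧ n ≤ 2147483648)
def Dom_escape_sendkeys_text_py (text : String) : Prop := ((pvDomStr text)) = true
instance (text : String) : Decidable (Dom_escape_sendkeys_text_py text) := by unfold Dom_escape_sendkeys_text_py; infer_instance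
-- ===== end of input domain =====

-- B replaces A's per-character loop+branch by a two-pointer segment scanner copying maximal ordinary runs as slices (alternative decomposition, same O(n)).
-- ===== PORT A =====
def escape_sendkeys_text_py (text : String) : String :=
  String.join (text.toList.foldl
    (fun result ch =>
      result ++ [if ch ∈ ['+', '^', '%', '~', '(', ')', '{', '}']
                 then "{" ++ String.singleton ch ++ "}"
                 else String.singleton ch])
    [])

-- ===== PORT B =====
-- _SPECIALS = set("+^%~(){}")
def pvSpecials : PySem.Set Char := PySem.Set.ofList "+^%~(){}".toList

-- the outer while loop: the inner 'while j < n and text[j] not in _SPECIALS' advance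
-- is the maximal non-special prefix (takeWhile/dropWhile of the remaining suffix)
def pvAltGo (l : List Char) : String :=
  match h : l.dropWhile (fun c => !(pvSpecials.contains c)) with
  | [] => String.ofList (l.takeWhile (fun c => !(pvSpecials.contains c)))
  | c :: rest =>
      String.ofList (l.takeWhile (fun c => !(pvSpecials.contains c)))
        ++ ("{" ++ String.singleton c ++ "}") ++ pvAltGo rest
termination_by l.length
decreasing_by
  have hle : (l.dropWhile (fun c => !(pvSpecials.contains c))).length ≤ l.length :=
    List.length_dropWhile_le _ _
  rw [h] at hle; simp at hle; omega

def escape_sendkeys_text_py_alt (text : String) : String :=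
  pvAltGo text.toList

-- ===== PRECONDITION & SPEC =====
def Spec_escape_sendkeys_text_py (text : String) (out : String) : Prop := out = escape_sendkeys_text_py_alt text
instance (text : String) (out : String) : Decidable (Spec_escape_sendkeys_text_py text out) := by unfold Spec_escape_sendkeys_text_py; infer_instance

-- ===== CLAIM (what is proved, stated in full; the proofs are below) =====
def Claim_equal_escape_sendkeys_text_py : Prop := ∀ (text : String), Dom_escape_sendkeys_text_py text → Spec_escape_sendkeys_text_py text (escape_sendkeys_text_py text)

-- ===== LEMMAS AND PROOFS =====

-- the common per-character reference value
def pvF (c : Char) : String :=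
  if c ∈ ['+', '^', '%', '~', '(', ')', '{', '}']
  then "{" ++ String.singleton c ++ "}" else String.singleton c

theorem pv_join_shift (l : List String) (s : String) :
    l.foldl (fun r t => r ++ t) s = s ++ l.foldl (fun r t => r ++ t) "" := by
  induction l generalizing s with
  | nil => simp
  | cons a l ih => rw [List.foldl_cons, List.foldl_cons, ih (s ++ a), ih ("" ++ a)]; simp [String.append_assoc]

theorem pv_join_append (a b : List String) :
    String.join (a ++ b) = String.join a ++ String.join b := by
  simp only [String.join, List.foldl_append]
  rw [pv_join_shift b]

-- A's fold equals join of the per-character map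
theorem pv_fold_eq (l : List Char) (acc : List String) :
    String.join (l.foldl (fun result ch => result ++ [pvF ch]) acc)
    = String.join acc ++ String.join (l.map pvF) := by
  induction l generalizing acc with
  | nil => simp [String.join]
  | cons c l ih =>
      simp only [List.foldl_cons, List.map_cons]
      rw [ih,
        show (pvF c :: l.map pvF) = [pvF c] ++ l.map pvF from rfl,
        pv_join_append, pv_join_append]
      simp [String.join, String.append_assoc]

theorem pv_special_iff (c : Char) :
    pvSpecials.contains c = true ↔ c ∈ ['+', '^', '%', '~', '(', ')', '{', '}'] := by
  rw [PySem.Set.contains_iff, pvSpecials,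
    show ("+^%~(){}".toList) = ['+', '^', '%', '~', '(', ')', '{', '}'] from rfl]
  rw [PySem.Set.mem_ofList]

theorem pv_mk_singleton_append (c : Char) (l : List Char) :
    String.ofList (c :: l) = String.singleton c ++ String.ofList l :=
  String.toList_inj.mp (by simp)

-- non-dependent unfolding of pvAltGo
theorem pvAltGo_unfold (l : List Char) :
    pvAltGo l =
      (match l.dropWhile (fun c => !(pvSpecials.contains c)) with
       | [] => String.ofList (l.takeWhile (fun c => !(pvSpecials.contains c)))
       | c :: rest =>
           String.ofList (l.takeWhile (fun c => !(pvSpecials.contains c)))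
             ++ ("{" ++ String.singleton c ++ "}") ++ pvAltGo rest) := by
  rw [pvAltGo]
  split
  · next h => rw [h]
  · next c rest h => rw [h]

-- B's segment scanner equals join of the per-character map
theorem pv_go_eq (l : List Char) : pvAltGo l = String.join (l.map pvF) := by
  induction l with
  | nil => rw [pvAltGo_unfold]; simp [String.join]
  | cons c t ih =>
      by_cases hs : pvSpecials.contains c = true
      · rw [pvAltGo_unfold]
        simp only [List.dropWhile_cons, List.takeWhile_cons, hs, Bool.not_true,
          Bool.false_eq_true, if_false]
        rw [ih]
        have hmk : String.ofList ([] : List Char) = "" := String.toList_inj.mp (by simp)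
        simp only [List.map_cons, String.join, List.foldl_cons, hmk]
        rw [pv_join_shift (t.map pvF) ("" ++ pvF c)]
        simp [pvF, (pv_special_iff c).mp hs, String.append_assoc]
      · have hb : (!(pvSpecials.contains c)) = true := by
          cases hcc : pvSpecials.contains c
          · rfl
          · exact absurd hcc hs
        have step : pvAltGo (c :: t) = String.singleton c ++ pvAltGo t := by
          rw [pvAltGo_unfold, pvAltGo_unfold]
          simp only [List.dropWhile_cons, List.takeWhile_cons, hb, if_pos]
          cases h : t.dropWhile (fun c => !(pvSpecials.contains c)) with
          | nil => rw [pv_mk_singleton_append]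
          | cons d r => rw [pv_mk_singleton_append]; simp [String.append_assoc]
        rw [step, ih]
        have hnotmem : c ∉ ['+', '^', '%', '~', '(', ')', '{', '}'] := by
          intro hm; exact hs ((pv_special_iff c).mpr hm)
        simp only [List.map_cons, String.join, List.foldl_cons]
        rw [pv_join_shift (t.map pvF) ("" ++ pvF c)]
        simp [pvF, hnotmem, String.singleton]

-- ===== VERDICT (by name: the statement is the Claim_ definition above) =====
theorem escape_sendkeys_text_py_spec : Claim_equal_escape_sendkeys_text_py := by
  intro text _
  unfold Spec_escape_sendkeys_text_py escape_sendkeys_text_py escape_sendkeys_text_py_alt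
  have hfun : (fun (result : List String) (ch : Char) =>
      result ++ [if ch ∈ ['+', '^', '%', '~', '(', ')', '{', '}']
                 then "{" ++ String.singleton ch ++ "}"
                 else String.singleton ch])
      = (fun result ch => result ++ [pvF ch]) := rfl
  rw [hfun, pv_fold_eq, pv_go_eq]
  simp [String.join]
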